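-- pv_equiv track=rewrite | github.com/milavdabgar/milav-next | latex-templates/refactor_pandoc_latex.py | fix_section_titles
-- ===== SOURCE A (Python) =====
-- def fix_section_titles(content):
--     """Fix multi-line section titles."""
--     lines = content.split('\n')
--     fixed_lines = []
--     i = 0
--
--     while i < len(lines):
--         line = lines[i]
--
--         if r'\subsection*{' in line and not line.rstrip().endswith('}'):
--             title_parts = [line]
--             i += 1
--             while i < len(lines) and not lines[i-1].rstrip().endswith('}'):
--                 title_parts.append(lines[i])
--                 i += 1
--                 if i >= len(lines):
--                     break
--
--             full_title = ' '.join(part.strip() for part in title_parts)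
--             full_title = full_title.replace('{[}', '[')
--             full_title = full_title.replace('{]}', ']')
--             fixed_lines.append(full_title)
--         else:
--             fixed_lines.append(line)
--             i += 1
--
--     return '\n'.join(fixed_lines)
-- ===== SOURCE B (Python) =====
-- def fix_section_titles(content):
--     """Fix multi-line section titles."""
--     lines = content.split('\n')
--     n = len(lines)
--     # next_close[k] = smallest index j >= k with lines[j].rstrip().endswith('}'), else n
--     next_close = [n] * (n + 1)
--     for k in range(n - 1, -1, -1):
--         next_close[k] = k if lines[k].rstrip().endswith('}') else next_close[k + 1]
--     out = []
--     i = 0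
--     while i < n:
--         line = lines[i]
--         if r'\subsection*{' in line and not line.rstrip().endswith('}'):
--             j = min(next_close[i + 1], n - 1)
--             title = ' '.join(l.strip() for l in lines[i:j + 1])
--             out.append(title.replace('{[}', '[').replace('{]}', ']'))
--             i = j + 1
--         else:
--             out.append(line)
--             i += 1
--     return '\n'.join(out)
-- ===== Notes on version B (the rewrite author's own statement) =====
-- stated objective: alternative
-- what changed: B first builds, in a backward pass, a successor table next_close[k] = index of the first closing-brace line at or after position k, then renders in a second pass that jumps directly from a title start to its closing line via the table and slices the title lines out, eliminating A's nested inner while scan and its accumulator list.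
import Mathlib
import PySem

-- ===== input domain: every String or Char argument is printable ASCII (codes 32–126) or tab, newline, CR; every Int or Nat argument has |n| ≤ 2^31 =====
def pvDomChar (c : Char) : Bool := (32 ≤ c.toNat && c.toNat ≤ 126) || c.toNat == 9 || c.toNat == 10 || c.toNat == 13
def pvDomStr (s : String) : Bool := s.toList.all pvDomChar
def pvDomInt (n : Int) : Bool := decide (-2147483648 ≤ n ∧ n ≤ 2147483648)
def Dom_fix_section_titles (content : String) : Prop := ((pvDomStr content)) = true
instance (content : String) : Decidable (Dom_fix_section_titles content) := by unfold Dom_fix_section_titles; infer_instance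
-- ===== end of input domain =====

-- B replaces A's nested scanning loops by a precomputed next-closing-line successor table
-- and a render pass that jumps and slices (objective: alternative, same cost).

-- shared primitives (the same Python expressions occur verbatim in both A and B)
def endsBrace (line : String) : Bool := PySem.Str.endswith (PySem.Str.rstrip line) "}"

def hasSub (line : String) : Bool := PySem.Str.isIn "\\subsection*{" line

def mergeTitle (parts : List String) : String :=
  PySem.Str.replace
    (PySem.Str.replace (PySem.Str.join " " (parts.map PySem.Str.strip)) "{[}" "[")
    "{]}" "]"

-- ===== PORT A =====
-- A's inner while loop: prev = lines[i-1]; collect following lines while prev doesn't rstrip-end with '}'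
def innerA (prev : String) : List String → List String × List String
  | [] => ([], [])
  | x :: xs =>
    if endsBrace prev then ([], x :: xs)
    else
      let pr := innerA x xs
      (x :: pr.1, pr.2)

-- cited by outerA's decreasing_by
theorem innerA_len (prev : String) (rest : List String) :
    (innerA prev rest).2.length ≤ rest.length := by
  induction rest generalizing prev with
  | nil => simp [innerA]
  | cons x xs ih =>
    simp only [innerA]
    split
    · simp
    · exact Nat.le_succ_of_le (ih x)

-- A's outer while loop over the line index
def outerA : List String → List String
  | [] => []
  | line :: rest =>
    if hasSub line && !endsBrace line then
      let pr := innerA line rest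
      mergeTitle (line :: pr.1) :: outerA pr.2
    else
      line :: outerA rest
termination_by l => l.length
decreasing_by
  · exact Nat.lt_succ_of_le (innerA_len line rest)
  · simp

def fix_section_titles (content : String) : String :=
  PySem.Str.join "\n" (outerA ((PySem.Str.split? content "\n").getD []))

-- ===== PORT B =====
-- B's backward table-filling loop, ported as right-recursion computing the same entries in the
-- same (right-to-left) order: ncB n ls i is the table slice next_close[i..n] for the suffix ls
-- of the lines starting at absolute index i (the final sentinel entry is next_close[n] = n).
def ncB (n : Nat) : List String → Nat → List Nat
  | [], _ => [n]
  | l :: ls, i =>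
    let rest := ncB n ls (i + 1)
    (if endsBrace l then i else rest.headD n) :: rest

-- B's render while loop; fuel = n bounds the iteration count (i strictly increases each step).
-- ncl.getD (i+1) n is Python's in-range read next_close[i+1]; the slice lines[i:j+1] is
-- (lines.drop i).take (j + 1 - i) since 0 ≤ i ≤ j + 1.
def loopB (lines : List String) (ncl : List Nat) (n : Nat) : Nat → Nat → List String
  | 0, _ => []
  | fuel + 1, i =>
    if i < n then
      let line := lines.getD i ""
      if hasSub line && !endsBrace line then
        let j := min (ncl.getD (i + 1) n) (n - 1)
        mergeTitle ((lines.drop i).take (j + 1 - i)) :: loopB lines ncl n fuel (j + 1)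
      else
        line :: loopB lines ncl n fuel (i + 1)
    else []

def fix_section_titles_alt (content : String) : String :=
  let lines := (PySem.Str.split? content "\n").getD []
  let n := lines.length
  PySem.Str.join "\n" (loopB lines (ncB n lines 0) n n 0)

-- ===== PRECONDITION & SPEC =====
def Spec_fix_section_titles (content : String) (out : String) : Prop := out = fix_section_titles_alt content
instance (content : String) (out : String) : Decidable (Spec_fix_section_titles content out) := by unfold Spec_fix_section_titles; infer_instance

-- ===== CLAIM (what is proved, stated in full; the proofs are below) =====
def Claim_equal_fix_section_titles : Prop := ∀ (content : String), Dom_fix_section_titles content → Spec_fix_section_titles content (fix_section_titles content)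

-- ===== LEMMAS AND PROOFS =====

theorem innerA_of_ends (x : String) (xs : List String) (hx : endsBrace x = true) :
    innerA x xs = ([], xs) := by
  cases xs <;> simp [innerA, hx]

-- A's inner loop collects lines up to and including the first one that rstrip-ends with '}'
theorem innerA_char (prev : String) (t : List String) (hprev : endsBrace prev = false) :
    innerA prev t =
      match t.findIdx? endsBrace with
      | some d => (t.take (d + 1), t.drop (d + 1))
      | none => (t, []) := by
  induction t generalizing prev with
  | nil => simp [innerA]
  | cons x xs ih =>
    simp only [innerA, hprev, Bool.false_eq_true, if_false, List.findIdx?_cons]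
    by_cases hx : endsBrace x = true
    · simp [hx, innerA_of_ends x xs hx]
    · rw [ih x (by simpa using hx)]
      simp only [hx]
      cases hfi : xs.findIdx? endsBrace <;> simp

-- the head of the table slice is the first closing index in the suffix (absolute), else n
theorem ncB_head (n : Nat) (ls : List String) (i : Nat) :
    (ncB n ls i).headD n =
      match ls.findIdx? endsBrace with
      | some d => i + d
      | none => n := by
  induction ls generalizing i with
  | nil => simp [ncB]
  | cons x xs ih =>
    simp only [ncB, List.findIdx?_cons, List.headD_cons]
    by_cases hx : endsBrace x = true
    · simp [hx]
    · rw [if_neg hx]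
      rw [ih (i + 1)]
      simp only [hx, Bool.false_eq_true, if_false]
      cases hfi : xs.findIdx? endsBrace with
      | some d => simp only [Option.map_some]; ring
      | none => simp

-- reading the table at offset k is the head of the table for the k-dropped suffix
theorem ncB_getD (n : Nat) (ls : List String) (i k : Nat) (hk : k ≤ ls.length) :
    (ncB n ls i).getD k n = (ncB n (ls.drop k) (i + k)).headD n := by
  induction k generalizing ls i with
  | zero =>
    cases ls <;> simp [ncB]
  | succ k ih =>
    cases ls with
    | nil => simp at hk
    | cons x xs =>
      simp only [ncB, List.getD_cons_succ, List.drop_succ_cons]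
      rw [ih xs (i + 1) (by simpa using hk)]
      have : i + 1 + k = i + (k + 1) := by omega
      rw [this]

theorem findIdx?_lt_length {p : String → Bool} {t : List String} {d : Nat}
    (h : t.findIdx? p = some d) : d < t.length :=
  List.findIdx?_eq_some_iff_findIdx_eq.mp h |>.1

-- main invariant: B's render loop at index i produces exactly A's output on the suffix
theorem loopB_eq_outerA (lines : List String) :
    ∀ fuel i, lines.length - i ≤ fuel →
      loopB lines (ncB lines.length lines 0) lines.length fuel i = outerA (lines.drop i) := by
  intro fuel
  induction fuel with
  | zero =>
    intro i h
    have : lines.length ≤ i := by omega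
    simp [loopB, List.drop_eq_nil_of_le this, outerA]
  | succ fuel ih =>
    intro i h
    by_cases hi : i < lines.length
    · have hdrop : lines.drop i = lines[i] :: lines.drop (i + 1) :=
        List.drop_eq_getElem_cons hi
      have hgetD : lines.getD i "" = lines[i] := List.getD_eq_getElem lines "" hi
      simp only [loopB, hi, if_true, hgetD]
      rw [hdrop]
      by_cases hb : (hasSub lines[i] && !endsBrace lines[i]) = true
      · have hnb : endsBrace lines[i] = false := by
          rcases Bool.and_eq_true_iff.mp hb with ⟨-, h2⟩; simpa using h2
        simp only [outerA, hb, if_true]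
        rw [innerA_char _ _ hnb]
        have hread : (ncB lines.length lines 0).getD (i + 1) lines.length =
            (ncB lines.length (lines.drop (i + 1)) (i + 1)).headD lines.length := by
          have := ncB_getD lines.length lines 0 (i + 1) (by omega)
          simpa using this
        rw [hread, ncB_head]
        cases hfi : (lines.drop (i + 1)).findIdx? endsBrace with
        | some d =>
          have hd : d < lines.length - (i + 1) := by
            have := findIdx?_lt_length hfi
            simpa using this
          have hj : min (i + 1 + d) (lines.length - 1) = i + 1 + d := by omega
          simp only [hj]
          have h2 : i + 1 + d + 1 - i = d + 1 + 1 := by omega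
          rw [h2, List.take_succ_cons]
          have hdrop2 : (lines.drop (i + 1)).drop (d + 1) = lines.drop (i + 1 + d + 1) := by
            rw [List.drop_drop]; congr 1
          rw [hdrop2, ih (i + 1 + d + 1) (by omega)]
        | none =>
          have hn1 : 1 ≤ lines.length := by omega
          have hj : min lines.length (lines.length - 1) = lines.length - 1 := by omega
          simp only [hj]
          have h2 : lines.length - 1 + 1 - i = (lines.length - (i + 1)) + 1 := by omega
          rw [h2, List.take_succ_cons]
          have htail : (lines.drop (i + 1)).take (lines.length - (i + 1)) = lines.drop (i + 1) := by
            apply List.take_of_length_le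
            simp
          rw [htail]
          have hend : lines.length - 1 + 1 = lines.length := by omega
          rw [hend, ih lines.length (by omega)]
          simp [outerA]
      · simp only [outerA, hb, if_false, Bool.false_eq_true]
        rw [ih (i + 1) (by omega)]
    · have hge : lines.length ≤ i := by omega
      simp [loopB, hi, List.drop_eq_nil_of_le hge, outerA]

-- ===== VERDICT (by name: the statement is the Claim_ definition above) =====
theorem fix_section_titles_spec : Claim_equal_fix_section_titles := by
  intro content _
  unfold Spec_fix_section_titles fix_section_titles fix_section_titles_alt
  show PySem.Str.join "\n" (outerA ((PySem.Str.split? content "\n").getD [])) =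
    PySem.Str.join "\n"
      (loopB ((PySem.Str.split? content "\n").getD [])
        (ncB ((PySem.Str.split? content "\n").getD []).length
          ((PySem.Str.split? content "\n").getD []) 0)
        ((PySem.Str.split? content "\n").getD []).length
        ((PySem.Str.split? content "\n").getD []).length 0)
  rw [loopB_eq_outerA ((PySem.Str.split? content "\n").getD []) _ 0 (by omega)]
  simp
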